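-- pv_equiv track=rewrite | github.com/sarweshshah/gait_analysis | usecases/medical_gait_analysis/medical_gait_events.py | _calculate_phase_durations
-- ===== SOURCE A (Python) =====
-- from typing import Dict, List, Tuple, Optional
--
-- def _calculate_phase_durations(start_events: List[int], end_events: List[int],
--                              next_cycle: bool = False) -> List[int]:
--     """Calculate durations between paired events."""
--     durations = []
--
--     for start in start_events:
--         if next_cycle:
--             # Find next event after start
--             next_events = [e for e in end_events if e > start]
--             if next_events:
--                 durations.append(next_events[0] - start)
--         else:
--             # Find closest event before next start
--             valid_ends = [e for e in end_events if e > start]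
--             if valid_ends:
--                 durations.append(valid_ends[0] - start)
--
--     return durations
-- ===== SOURCE B (Python) =====
-- from typing import List
--
-- def _calculate_phase_durations(start_events: List[int], end_events: List[int],
--                                next_cycle: bool = False) -> List[int]:
--     """Calculate durations between paired events.
--
--     The first end event (in list order) strictly greater than a start is
--     always a prefix-maximum "record" of end_events; the records form a
--     strictly increasing list, so each start is resolved by binary search.
--     """
--     records = []
--     best = None
--     for e in end_events:
--         if best is None or e > best:
--             records.append(e)
--             best = e
--     durations = []
--     for start in start_events:
--         lo, hi = 0, len(records)
--         while lo < hi: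
--             mid = (lo + hi) // 2
--             if start < records[mid]:
--                 hi = mid
--             else:
--                 lo = mid + 1
--         if lo < len(records):
--             durations.append(records[lo] - start)
--     return durations
-- ===== Notes on version B (the rewrite author's own statement) =====
-- stated objective: faster
-- what changed: Replaces the per-start full scan/filter of end_events by a precomputed strictly increasing list of prefix-maximum records plus a binary search per start.
import Mathlib
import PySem

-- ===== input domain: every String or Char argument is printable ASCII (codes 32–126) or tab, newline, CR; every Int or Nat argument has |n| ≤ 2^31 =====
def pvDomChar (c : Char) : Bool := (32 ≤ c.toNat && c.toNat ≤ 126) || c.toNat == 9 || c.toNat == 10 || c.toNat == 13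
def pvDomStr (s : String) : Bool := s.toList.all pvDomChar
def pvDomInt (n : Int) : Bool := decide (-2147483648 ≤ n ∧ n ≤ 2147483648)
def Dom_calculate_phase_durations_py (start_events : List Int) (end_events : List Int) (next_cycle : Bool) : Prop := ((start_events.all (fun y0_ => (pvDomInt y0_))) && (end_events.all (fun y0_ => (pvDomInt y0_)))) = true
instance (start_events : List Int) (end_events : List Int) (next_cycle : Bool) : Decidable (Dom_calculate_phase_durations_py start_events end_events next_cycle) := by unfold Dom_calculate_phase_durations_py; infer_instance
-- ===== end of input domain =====

-- B replaces A's per-start scan of end_events by prefix-maximum records + binary search (faster).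


-- ===== PORT A =====
def calculate_phase_durations_py (start_events : List Int) (end_events : List Int) (next_cycle : Bool) : List Int :=
  start_events.foldl (fun durations start =>
    if next_cycle then
      -- Find next event after start
      let next_events := end_events.filter (fun e => e > start)
      match next_events with
      | [] => durations
      | v :: _ => durations ++ [v - start]
    else
      -- Find closest event before next start
      let valid_ends := end_events.filter (fun e => e > start)
      match valid_ends with
      | [] => durations
      | v :: _ => durations ++ [v - start]) []

-- ===== PORT B =====
-- the `for e in end_events` loop building `records`, with `best : Option Int` mirroring best=None
def pvRecords (best : Option Int) (es : List Int) : List Int :=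
  match es with
  | [] => []
  | e :: t =>
    match best with
    | none => e :: pvRecords (some e) t
    | some b => if e > b then e :: pvRecords (some e) t else pvRecords (some b) t

-- the `while lo < hi` binary-search loop
def pvBisect (xs : List Int) (x : Int) (lo hi : Nat) : Nat :=
  if _h : lo < hi then
    let mid := (lo + hi) / 2
    if x < xs.getD mid 0 then pvBisect xs x lo mid else pvBisect xs x (mid + 1) hi
  else lo
termination_by hi - lo

def calculate_phase_durations_py_alt (start_events : List Int) (end_events : List Int) (next_cycle : Bool) : List Int :=
  let records := pvRecords none end_events
  start_events.foldl (fun durations start =>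
    let lo := pvBisect records start 0 records.length
    if lo < records.length then durations ++ [records.getD lo 0 - start] else durations) []

-- ===== PRECONDITION & SPEC =====
def Spec_calculate_phase_durations_py (start_events : List Int) (end_events : List Int) (next_cycle : Bool) (out : List Int) : Prop := out = calculate_phase_durations_py_alt start_events end_events next_cycle
instance (start_events : List Int) (end_events : List Int) (next_cycle : Bool) (out : List Int) : Decidable (Spec_calculate_phase_durations_py start_events end_events next_cycle out) := by unfold Spec_calculate_phase_durations_py; infer_instance

-- ===== CLAIM (what is proved, stated in full; the proofs are below) =====
def Claim_equal_calculate_phase_durations_py : Prop := ∀ (start_events : List Int) (end_events : List Int) (next_cycle : Bool), Dom_calculate_phase_durations_py start_events end_events next_cycle → Spec_calculate_phase_durations_py start_events end_events next_cycle (calculate_phase_durations_py start_events end_events next_cycle)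

-- ===== LEMMAS AND PROOFS =====

-- every record built from best = some b is greater than b
theorem pvRecords_gt (es : List Int) (b : Int) :
    ∀ x ∈ pvRecords (some b) es, b < x := by
  induction es generalizing b with
  | nil => simp [pvRecords]
  | cons e t ih =>
    intro x hx
    simp only [pvRecords] at hx
    split at hx
    · rename_i hbe
      rcases List.mem_cons.mp hx with rfl | hx
      · exact hbe
      · exact lt_trans hbe (ih e x hx)
    · exact ih b x hx

-- records are strictly increasing
theorem pvRecords_sorted (es : List Int) (b : Option Int) :
    (pvRecords b es).Pairwise (· < ·) := by
  induction es generalizing b with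
  | nil => simp [pvRecords]
  | cons e t ih =>
    cases b with
    | none =>
      simp only [pvRecords, List.pairwise_cons]
      exact ⟨pvRecords_gt t e, ih (some e)⟩
    | some b =>
      simp only [pvRecords]
      split
      · simp only [List.pairwise_cons]
        exact ⟨pvRecords_gt t e, ih (some e)⟩
      · exact ih (some b)

-- dropping elements ≤ the running maximum never changes the first element > s
theorem pvRecords_firstGT (es : List Int) (b s : Int) (hbs : b ≤ s) :
    ((pvRecords (some b) es).filter (fun e => s < e)).head?
      = (es.filter (fun e => s < e)).head? := by
  induction es generalizing b with
  | nil => simp [pvRecords]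
  | cons e t ih =>
    simp only [pvRecords]
    split
    · rename_i hbe
      by_cases hse : s < e
      · simp [List.filter_cons, hse]
      · simp only [List.filter_cons, decide_eq_false hse, Bool.false_eq_true, if_false]
        exact ih e (not_lt.mp hse)
    · rename_i hbe
      have hse : ¬ s < e := fun hc => hbe (lt_of_le_of_lt hbs hc)
      simp only [List.filter_cons, decide_eq_false hse, Bool.false_eq_true, if_false]
      exact ih b hbs

theorem pvRecords_firstGT_none (es : List Int) (s : Int) :
    ((pvRecords none es).filter (fun e => s < e)).head?
      = (es.filter (fun e => s < e)).head? := by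
  cases es with
  | nil => simp [pvRecords]
  | cons e t =>
    simp only [pvRecords]
    by_cases hse : s < e
    · simp [List.filter_cons, hse]
    · simp only [List.filter_cons, decide_eq_false hse, Bool.false_eq_true, if_false]
      exact pvRecords_firstGT t e s (not_lt.mp hse)

-- sortedness gives monotonicity by index
theorem pv_sorted_mono (xs : List Int) (hs : xs.Pairwise (· < ·))
    {i j : Nat} (hij : i ≤ j) (hj : j < xs.length) :
    xs.getD i 0 ≤ xs.getD j 0 := by
  rcases eq_or_lt_of_le hij with rfl | hlt
  · exact le_refl _
  · have := (List.pairwise_iff_getElem.mp hs) i j (lt_trans hlt hj) hj hlt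
    have hi : i < xs.length := lt_trans hlt hj
    simpa [List.getD_eq_getElem?_getD, List.getElem?_eq_getElem, hi, hj] using le_of_lt this

-- binary-search invariant
theorem pvBisect_invariant (xs : List Int) (hs : xs.Pairwise (· < ·)) (x : Int) :
    ∀ (n lo hi : Nat), hi - lo ≤ n → lo ≤ hi → hi ≤ xs.length →
    (∀ i < lo, ¬ x < xs.getD i 0) →
    (∀ i, hi ≤ i → i < xs.length → x < xs.getD i 0) →
    lo ≤ pvBisect xs x lo hi ∧ pvBisect xs x lo hi ≤ hi ∧
      (∀ i < pvBisect xs x lo hi, ¬ x < xs.getD i 0) ∧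
      (∀ i, pvBisect xs x lo hi ≤ i → i < xs.length → x < xs.getD i 0) := by
  intro n
  induction n with
  | zero =>
    intro lo hi hn hlohi hhil hlow hhigh
    have heq : lo = hi := by omega
    rw [pvBisect]
    simp only [show ¬ lo < hi by omega, dif_neg, not_false_iff]
    exact ⟨le_refl _, le_of_eq heq, hlow, fun i h1 h2 => hhigh i (heq ▸ h1) h2⟩
  | succ n ih =>
    intro lo hi hn hlohi hhil hlow hhigh
    rw [pvBisect]
    by_cases h : lo < hi
    · simp only [h, dif_pos]
      by_cases hx : x < xs.getD ((lo + hi) / 2) 0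
      · simp only [hx, if_pos]
        have hmlen : (lo + hi) / 2 < xs.length := by omega
        have hnew : ∀ i, (lo + hi) / 2 ≤ i → i < xs.length → x < xs.getD i 0 := by
          intro i hi1 hi2
          exact lt_of_lt_of_le hx (pv_sorted_mono xs hs hi1 hi2)
        have hr := ih lo ((lo + hi) / 2) (by omega) (by omega) (by omega) hlow hnew
        exact ⟨hr.1, le_trans hr.2.1 (by omega), hr.2.2.1, hr.2.2.2⟩
      · simp only [hx, if_neg (fun hc => hx hc)]
        have hmlen : (lo + hi) / 2 < xs.length := by omega
        have hnew : ∀ i < (lo + hi) / 2 + 1, ¬ x < xs.getD i 0 := by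
          intro i hi1 hcon
          by_cases hil : i < lo
          · exact hlow i hil hcon
          · exact hx (lt_of_lt_of_le hcon (pv_sorted_mono xs hs (by omega) hmlen))
        have hr := ih ((lo + hi) / 2 + 1) hi (by omega) (by omega) hhil hnew hhigh
        exact ⟨le_trans (by omega) hr.1, hr.2.1, hr.2.2.1, hr.2.2.2⟩
    · simp only [h, dif_neg, not_false_iff]
      have heq : lo = hi := by omega
      exact ⟨le_refl _, le_of_eq heq, hlow, fun i h1 h2 => hhigh i (heq ▸ h1) h2⟩

-- filter of a split list is a drop
theorem pv_filter_eq_drop (xs : List Int) (p : Int → Bool) :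
    ∀ r : Nat, r ≤ xs.length →
    (∀ i < r, ¬ p (xs.getD i 0) = true) →
    (∀ i, r ≤ i → i < xs.length → p (xs.getD i 0) = true) →
    xs.filter p = xs.drop r := by
  induction xs with
  | nil => intro r hr _ _; simp_all
  | cons a t ih =>
    intro r hr hlow hhigh
    cases r with
    | zero =>
      rw [List.drop_zero, List.filter_eq_self]
      intro b hb
      rcases List.getElem_of_mem hb with ⟨i, hi, rfl⟩
      have := hhigh i (Nat.zero_le _) hi
      simpa [List.getD_eq_getElem?_getD, List.getElem?_eq_getElem hi] using this
    | succ r' =>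
      have hpa : p a = false := by
        have := hlow 0 (Nat.succ_pos _)
        simpa using this
      simp only [List.filter_cons, hpa, Bool.false_eq_true, if_false, List.drop_succ_cons]
      exact ih r' (by simpa using hr)
        (fun i hi => by have := hlow (i+1) (by omega); simpa using this)
        (fun i hi1 hi2 => by have := hhigh (i+1) (by omega) (by simpa using hi2); simpa using this)

-- per-start item equality
theorem pv_item_eq (end_events : List Int) (start : Int)
    (records : List Int) (hrec : records = pvRecords none end_events)
    (lo : Nat) (hlo : lo = pvBisect records start 0 records.length) :
    (if lo < records.length then some (records.getD lo 0 - start) else none)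
      = ((end_events.filter (fun e => start < e)).head?).map (fun v => v - start) := by
  have hs : records.Pairwise (· < ·) := hrec ▸ pvRecords_sorted end_events none
  have hinv := pvBisect_invariant records hs start records.length 0 records.length
    (by omega) (Nat.zero_le _) (le_refl _)
    (fun i h1 => absurd h1 (by omega))
    (fun i h1 h2 => absurd (lt_of_le_of_lt h1 h2) (lt_irrefl _))
  rw [← hlo] at hinv
  have hdrop : records.filter (fun e => start < e) = records.drop lo :=
    pv_filter_eq_drop records _ lo hinv.2.1
      (fun i hi => by simpa using hinv.2.2.1 i hi)
      (fun i h1 h2 => by simpa using hinv.2.2.2 i h1 h2)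
  rw [← pvRecords_firstGT_none end_events start, ← hrec, hdrop]
  by_cases h : lo < records.length
  · have hh : (records.drop lo).head? = some records[lo] := by
      rw [List.head?_drop]
      exact List.getElem?_eq_getElem h
    simp [h, hh, List.getD_eq_getElem?_getD, List.getElem?_eq_getElem h]
  · have hnil : records.drop lo = [] := List.drop_eq_nil_of_le (not_lt.mp h)
    simp [h, hnil]

-- fold equality given pointwise item equality
theorem pv_folds_eq (end_events : List Int) (next_cycle : Bool) :
    ∀ (starts acc : List Int),
    starts.foldl (fun durations start =>
      if next_cycle then
        match end_events.filter (fun e => e > start) with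
        | [] => durations
        | v :: _ => durations ++ [v - start]
      else
        match end_events.filter (fun e => e > start) with
        | [] => durations
        | v :: _ => durations ++ [v - start]) acc
    = starts.foldl (fun durations start =>
        let records := pvRecords none end_events
        let lo := pvBisect records start 0 records.length
        if lo < records.length then durations ++ [records.getD lo 0 - start] else durations) acc := by
  intro starts
  induction starts with
  | nil => intro acc; rfl
  | cons s t ih =>
    intro acc
    simp only [List.foldl_cons]
    rw [ih]
    congr 1
    have hitem := pv_item_eq end_events s _ rfl _ rfl
    show _ = (let records := pvRecords none end_events
      let lo := pvBisect records s 0 records.length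
      if lo < records.length then acc ++ [records.getD lo 0 - s] else acc)
    simp only []
    rcases hcase : end_events.filter (fun e => s < e) with _ | ⟨v, rest⟩
    · rw [hcase] at hitem
      simp only [List.head?_nil, Option.map_none] at hitem
      have hcond : ¬ pvBisect (pvRecords none end_events) s 0 (pvRecords none end_events).length
          < (pvRecords none end_events).length := by
        intro h
        rw [if_pos h] at hitem
        simp at hitem
      have hcase' : end_events.filter (fun e => e > s) = [] := hcase
      cases next_cycle <;> simp [hcase', hcond]
    · rw [hcase] at hitem
      simp only [List.head?_cons, Option.map_some] at hitem
      by_cases h : pvBisect (pvRecords none end_events) s 0 (pvRecords none end_events).length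
          < (pvRecords none end_events).length
      · rw [if_pos h] at hitem
        have hval := Option.some.inj hitem
        simp only [List.getD_eq_getElem?_getD, List.getElem?_eq_getElem h, Option.getD_some] at hval
        have hv : (pvRecords none end_events)[pvBisect (pvRecords none end_events) s 0
            (pvRecords none end_events).length] = v := by omega
        have hcase' : end_events.filter (fun e => e > s) = v :: rest := hcase
        cases next_cycle <;> simp [hcase', h, hv]
      · rw [if_neg h] at hitem
        simp at hitem

-- ===== VERDICT (by name: the statement is the Claim_ definition above) =====
theorem calculate_phase_durations_py_spec : Claim_equal_calculate_phase_durations_py := by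
  intro start_events end_events next_cycle _
  unfold Spec_calculate_phase_durations_py calculate_phase_durations_py calculate_phase_durations_py_alt
  exact pv_folds_eq end_events next_cycle start_events []
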